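-- pv_equiv track=rewrite | github.com/chubajs/imagefox | vision_analyzer.py | _find_consensus_items
-- ===== SOURCE A (Python) =====
-- from typing import Dict, List, Optional, Any, Union, Tuple
--
-- def _find_consensus_items(items: List[str], min_frequency: int = 2) -> List[str]:
--     """Find items that appear in multiple analyses."""
--     from collections import Counter
--
--     # Count occurrences (case-insensitive)
--     counter = Counter(item.lower() for item in items)
--
--     # Return items that appear at least min_frequency times
--     consensus_items = []
--     for item, count in counter.most_common():
--         if count >= min_frequency:
--             # Find original case
--             original = next(original for original in items if original.lower() == item)
--             consensus_items.append(original)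
--
--     return consensus_items[:10]  # Limit to top 10
-- ===== SOURCE B (Python) =====
-- def _find_consensus_items(items, min_frequency=2):
--     """Find items that appear in multiple analyses (counting-sort re-implementation)."""
--     # One pass: count per lowercase key, remember first original-case spelling.
--     counts = {}
--     first = {}
--     for item in items:
--         low = item.lower()
--         counts[low] = counts.get(low, 0) + 1
--         first.setdefault(low, item)
--     # Counting sort by frequency: bucket keys by their count.
--     max_count = 0
--     for c in counts.values():
--         if c > max_count:
--             max_count = c
--     buckets = [[] for _ in range(max_count + 1)]
--     for low, c in counts.items():
--         buckets[c].append(low)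
--     result = []
--     threshold = min_frequency if min_frequency > 1 else 1
--     for c in range(max_count, threshold - 1, -1):
--         for low in buckets[c]:
--             result.append(first[low])
--     return result[:10]
-- ===== Notes on version B (the rewrite author's own statement) =====
-- stated objective: alternative
-- what changed: Replaces Counter + most_common (comparison sort) + a repeated linear 'next' scan over items per consensus key with a single pass that builds count and first-original dicts, then a counting sort by frequency (buckets walked from max count down), preserving first-appearance tie order.
import Mathlib
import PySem

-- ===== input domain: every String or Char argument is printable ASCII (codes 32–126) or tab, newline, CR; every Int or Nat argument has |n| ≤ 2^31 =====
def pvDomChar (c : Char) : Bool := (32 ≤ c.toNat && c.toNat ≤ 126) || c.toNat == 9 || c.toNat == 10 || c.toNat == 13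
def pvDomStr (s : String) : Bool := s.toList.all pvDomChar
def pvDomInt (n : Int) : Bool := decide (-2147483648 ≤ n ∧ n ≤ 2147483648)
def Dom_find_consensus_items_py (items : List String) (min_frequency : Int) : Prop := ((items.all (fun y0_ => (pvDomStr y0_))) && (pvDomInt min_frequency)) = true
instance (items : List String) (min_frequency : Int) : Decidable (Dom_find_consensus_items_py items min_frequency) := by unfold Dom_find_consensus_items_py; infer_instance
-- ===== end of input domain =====

-- B replaces Counter.most_common + per-key linear 'next' scans with one counting pass
-- (count dict + first-original dict) and a counting sort by frequency: a different algorithm.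


-- ===== PORT A =====
-- Literal port of _find_consensus_items: Counter of lowered items, most_common
-- (= stable sort of the items by count, reverse), then for each frequent key a
-- linear 'next' scan over items for the first original-case spelling; [:10].
def find_consensus_items_py (items : List String) (min_frequency : Int) : List String :=
  let counter := PySem.Dict.counter (items.map (fun item => PySem.Str.lower item))
  let consensus_items := (PySem.List.sorted counter.items (fun p => p.2) true).foldl
    (fun acc p =>
      if min_frequency ≤ p.2 then
        match items.find? (fun original => PySem.Str.lower original == p.1) with
        | some original => acc ++ [original]
        | none => acc   -- unreachable: p.1 is the lowering of some element of items
      else acc) []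
  PySem.List.slice consensus_items none (some 10)

-- ===== PORT B =====
-- Port of Source B: one pass building counts / first-original dicts, then a
-- counting sort by frequency (buckets indexed by count, walked downwards).
def find_consensus_items_py_alt (items : List String) (min_frequency : Int) : List String :=
  let st := items.foldl
    (fun (st : PySem.Dict String Int × PySem.Dict String String) item =>
      (st.1.insert (PySem.Str.lower item) (st.1.getD (PySem.Str.lower item) 0 + 1),
       st.2.setdefault (PySem.Str.lower item) item))
    (PySem.Dict.empty, PySem.Dict.empty)
  let counts := st.1
  let first := st.2
  let max_count := counts.values.foldl (fun m c => if c > m then c else m) 0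
  let buckets := (PySem.List.pyRange 0 (max_count + 1) 1).map (fun _ => ([] : List String))
  let buckets := counts.items.foldl
    (fun bk p => PySem.List.pySetD bk p.2 (PySem.List.pyGetD bk p.2 [] ++ [p.1])) buckets
  let threshold := if min_frequency > 1 then min_frequency else 1
  let result := (PySem.List.pyRange max_count (threshold - 1) (-1)).foldl
    (fun res c => (PySem.List.pyGetD buckets c []).foldl
      (fun res low => res ++ [first.getD low ""]) res) []
  PySem.List.slice result none (some 10)

-- ===== PRECONDITION & SPEC =====
def Spec_find_consensus_items_py (items : List String) (min_frequency : Int) (out : List String) : Prop := out = find_consensus_items_py_alt items min_frequency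
instance (items : List String) (min_frequency : Int) (out : List String) : Decidable (Spec_find_consensus_items_py items min_frequency out) := by unfold Spec_find_consensus_items_py; infer_instance

-- ===== CLAIM (what is proved, stated in full; the proofs are below) =====
def Claim_equal_find_consensus_items_py : Prop := ∀ (items : List String) (min_frequency : Int), Dom_find_consensus_items_py items min_frequency → Spec_find_consensus_items_py items min_frequency (find_consensus_items_py items min_frequency)

-- ===== LEMMAS AND PROOFS =====

-- `gkey l hi n` lists the elements of l with second component hi, hi-1, ..., hi-n+1,
-- bucket by bucket in original order: the shape shared by A's stable reverse sort by
-- count and B's downward bucket walk.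
def gkey (l : List (String × Int)) : Int → Nat → List (String × Int)
  | _, 0 => []
  | hi, n+1 => l.filter (fun p => p.2 = hi) ++ gkey l (hi-1) n

theorem gkey_nil : ∀ (n : Nat) (hi : Int), gkey [] hi n = [] := by
  intro n
  induction n with
  | zero => intro hi; rfl
  | succ n ih => intro hi; simp [gkey, ih]

theorem mem_gkey (l : List (String × Int)) :
    ∀ (n : Nat) (hi : Int) (p : String × Int), p ∈ gkey l hi n → p ∈ l ∧ p.2 ≤ hi := by
  intro n
  induction n with
  | zero => intro hi p hp; simp [gkey] at hp
  | succ n ih =>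
    intro hi p hp
    simp only [gkey, List.mem_append, List.mem_filter] at hp
    rcases hp with ⟨hl, he⟩ | ht
    · exact ⟨hl, by simp at he; omega⟩
    · obtain ⟨hl, hle⟩ := ih (hi - 1) p ht
      exact ⟨hl, by omega⟩

theorem gkey_append_gt (l : List (String × Int)) (x : String × Int) :
    ∀ (n : Nat) (hi : Int), hi < x.2 → gkey (l ++ [x]) hi n = gkey l hi n := by
  intro n
  induction n with
  | zero => intro hi _; rfl
  | succ n ih =>
    intro hi h
    simp only [gkey, List.filter_append, ih (hi - 1) (by omega)]
    have : List.filter (fun p => decide (p.2 = hi)) [x] = [] := by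
      simp; omega
    simp [this]

theorem insertBy_append_not {α : Type} (before : α → α → Bool) (x : α) :
    ∀ (A B : List α), (∀ a ∈ A, before x a = false) →
      PySem.List.insertBy before x (A ++ B) = A ++ PySem.List.insertBy before x B := by
  intro A
  induction A with
  | nil => intro B _; rfl
  | cons a A ih =>
    intro B h
    have ha : before x a = false := h a (by simp)
    simp only [List.cons_append, PySem.List.insertBy, ha]
    simp [ih B (fun b hb => h b (by simp [hb]))]

theorem insertBy_gkey (l : List (String × Int)) (x : String × Int) :
    ∀ (n : Nat) (hi : Int), hi - n < x.2 → x.2 ≤ hi →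
      PySem.List.insertBy (fun a b => decide (b.2 < a.2)) x (gkey l hi n) =
        gkey (l ++ [x]) hi n := by
  intro n
  induction n with
  | zero => intro hi h1 h2; simp at h1; omega
  | succ n ih =>
    intro hi h1 h2
    by_cases hx : x.2 = hi
    · -- x goes at the end of the top bucket
      have hfl : ∀ a ∈ l.filter (fun p => decide (p.2 = hi)), (fun a b => decide (b.2 < a.2)) x a = false := by
        intro a ha
        simp only [List.mem_filter, decide_eq_true_eq] at ha
        simp [ha.2, hx]
      simp only [gkey]
      rw [insertBy_append_not _ _ _ _ hfl]
      rw [gkey_append_gt l x n (hi - 1) (by omega)]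
      have hfx : List.filter (fun p => decide (p.2 = hi)) (l ++ [x]) =
          List.filter (fun p => decide (p.2 = hi)) l ++ [x] := by
        simp [List.filter_append, hx]
      rw [hfx]
      cases hg : gkey l (hi - 1) n with
      | nil => simp [PySem.List.insertBy]
      | cons g t =>
        have hgle : g.2 ≤ hi - 1 := by
          have := mem_gkey l n (hi - 1) g (by rw [hg]; simp)
          exact this.2
        have : (fun (a b : String × Int) => decide (b.2 < a.2)) x g = true := by
          simp; omega
        simp only [PySem.List.insertBy, this]
        simp
    · -- x belongs to a lower bucket
      have hxlt : x.2 < hi := lt_of_le_of_ne h2 hx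
      simp only [gkey]
      have hfl : ∀ a ∈ l.filter (fun p => decide (p.2 = hi)), (fun a b => decide (b.2 < a.2)) x a = false := by
        intro a ha
        simp only [List.mem_filter, decide_eq_true_eq] at ha
        simp [ha.2]; omega
      rw [insertBy_append_not _ _ _ _ hfl]
      rw [ih (hi - 1) (by omega) (by omega)]
      have hfx : List.filter (fun p => decide (p.2 = hi)) (l ++ [x]) =
          List.filter (fun p => decide (p.2 = hi)) l := by
        simp [List.filter_append]; omega
      rw [hfx]

theorem foldl_insertBy_gkey :
    ∀ (l : List (String × Int)) (n : Nat) (hi : Int),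
      (∀ p ∈ l, hi - n < p.2 ∧ p.2 ≤ hi) →
      l.foldl (fun acc x => PySem.List.insertBy (fun a b => decide (b.2 < a.2)) x acc) [] =
        gkey l hi n := by
  intro l
  induction l using List.reverseRecOn with
  | nil => intro n hi _; exact (gkey_nil n hi).symm
  | append_singleton t x ih =>
    intro n hi h
    rw [List.foldl_append]
    simp only [List.foldl_cons, List.foldl_nil]
    rw [ih n hi (fun p hp => h p (by simp [hp]))]
    have hx := h x (by simp)
    exact insertBy_gkey t x n hi hx.1 hx.2

theorem sorted_eq_gkey (l : List (String × Int)) (n : Nat) (hi : Int)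
    (h : ∀ p ∈ l, hi - n < p.2 ∧ p.2 ≤ hi) :
    PySem.List.sorted l (fun p => p.2) true = gkey l hi n := by
  rw [PySem.List.sorted_rev_eq_foldl_insertBy l (fun p => p.2)]
  exact foldl_insertBy_gkey l n hi h

theorem gkey_add (l : List (String × Int)) :
    ∀ (a b : Nat) (hi : Int), gkey l hi (a + b) = gkey l hi a ++ gkey l (hi - a) b := by
  intro a
  induction a with
  | zero => intro b hi; simp [gkey]
  | succ a ih =>
    intro b hi
    have h1 : a + 1 + b = (a + b) + 1 := by omega
    rw [h1]
    simp only [gkey]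
    rw [ih b (hi - 1)]
    have h2 : hi - 1 - a = hi - (a + 1 : Nat) := by push_cast; ring
    rw [h2, List.append_assoc]

theorem gkey_empty_of_gt (l : List (String × Int)) :
    ∀ (n : Nat) (hi : Int), (∀ p ∈ l, hi < p.2) → gkey l hi n = [] := by
  intro n
  induction n with
  | zero => intro hi _; rfl
  | succ n ih =>
    intro hi h
    simp only [gkey]
    rw [ih (hi - 1) (fun p hp => by have := h p hp; omega)]
    have : List.filter (fun p => decide (p.2 = hi)) l = [] := by
      rw [List.filter_eq_nil_iff]
      intro p hp
      have := h p hp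
      simp; omega
    simp [this]

theorem filter_gkey (l : List (String × Int)) (q : String × Int → Bool) :
    ∀ (n : Nat) (hi : Int), (gkey l hi n).filter q = gkey (l.filter q) hi n := by
  intro n
  induction n with
  | zero => intro hi; rfl
  | succ n ih =>
    intro hi
    simp only [gkey, List.filter_append, ih (hi - 1)]
    congr 1
    simp only [List.filter_filter]
    apply List.filter_congr
    intro x _
    exact Bool.and_comm _ _

theorem gkey_filter_ge (l : List (String × Int)) (mf : Int) :
    ∀ (n : Nat) (hi : Int), (∀ c : Int, hi - n < c → c ≤ hi → mf ≤ c) →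
      gkey (l.filter (fun p => decide (mf ≤ p.2))) hi n = gkey l hi n := by
  intro n
  induction n with
  | zero => intro hi _; rfl
  | succ n ih =>
    intro hi h
    simp only [gkey]
    rw [ih (hi - 1) (fun c h1 h2 => h c (by push_cast at h1 ⊢; omega) (by omega))]
    congr 1
    simp only [List.filter_filter]
    apply List.filter_congr
    intro x _
    by_cases hx : x.2 = hi
    · have : mf ≤ hi := h hi (by push_cast; omega) le_rfl
      simp [hx]; omega
    · simp [hx]

theorem range_flatMap {β : Type} (P : List (String × Int)) (f : String × Int → β) :
    ∀ (n : Nat) (hi lo : Int), (hi - lo).toNat = n →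
      (PySem.List.pyRange hi lo (-1)).flatMap
          (fun c => (P.filter (fun p => decide (p.2 = c))).map f) =
        (gkey P hi n).map f := by
  intro n
  induction n with
  | zero =>
    intro hi lo h
    rw [PySem.List.pyRange_neg_one_eq_nil (by omega)]
    rfl
  | succ n ih =>
    intro hi lo h
    rw [PySem.List.pyRange_neg_one_cons (by omega)]
    simp only [List.flatMap_cons, gkey, List.map_append]
    rw [ih (hi - 1) lo (by omega)]

theorem pyGetD_map_const_nil {α : Type} (xs : List α) (c : Int) :
    PySem.List.pyGetD (xs.map (fun _ => ([] : List String))) c [] = [] := by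
  simp only [PySem.List.pyGetD]
  cases h : PySem.List.pyGet? (xs.map (fun _ => ([] : List String))) c with
  | none => rfl
  | some v =>
    have hv := PySem.List.mem_of_pyGet?_eq_some _ h
    simp only [List.mem_map] at hv
    obtain ⟨_, _, hv⟩ := hv
    simp [← hv]

theorem buckets_spec (l : List (String × Int)) :
    ∀ (bk : List (List String)) (c : Int),
      (∀ p ∈ l, 0 ≤ p.2 ∧ p.2 < (bk.length : Int)) → 0 ≤ c → c < (bk.length : Int) →
      PySem.List.pyGetD
          (l.foldl (fun bk p => PySem.List.pySetD bk p.2 (PySem.List.pyGetD bk p.2 [] ++ [p.1])) bk) c [] =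
        PySem.List.pyGetD bk c [] ++ (l.filter (fun p => decide (p.2 = c))).map (·.1) := by
  induction l with
  | nil => intro bk c _ _ _; simp
  | cons p l ih =>
    intro bk c h hc0 hc1
    have hp := h p (by simp)
    simp only [List.foldl_cons]
    have hset : PySem.List.pySetD bk p.2 (PySem.List.pyGetD bk p.2 [] ++ [p.1]) =
        bk.set p.2.toNat (PySem.List.pyGetD bk p.2 [] ++ [p.1]) :=
      PySem.List.pySetD_of_nonneg bk _ hp.1
    have hlen : (bk.set p.2.toNat (PySem.List.pyGetD bk p.2 [] ++ [p.1])).length = bk.length := by simp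
    rw [hset, ih _ c (by rw [hlen]; exact fun q hq => h q (by simp [hq])) hc0 (by rw [hlen]; exact hc1)]
    have hget : PySem.List.pyGetD (bk.set p.2.toNat (PySem.List.pyGetD bk p.2 [] ++ [p.1])) c [] =
        if p.2 = c then PySem.List.pyGetD bk c [] ++ [p.1] else PySem.List.pyGetD bk c [] := by
      rw [PySem.List.pyGetD_eq_getElem _ _ hc0 (by rw [hlen]; exact hc1)]
      rw [List.getElem_set]
      by_cases he : p.2 = c
      · subst he
        simp
      · have : ¬ (p.2.toNat = c.toNat) := by omega
        rw [if_neg this, if_neg he]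
        rw [PySem.List.pyGetD_eq_getElem _ _ hc0 hc1]
    rw [hget]
    by_cases he : p.2 = c
    · simp [he, List.append_assoc]
    · simp [he]

theorem first_get? (items : List String) :
    ∀ (d : PySem.Dict String String) (k : String),
      (items.foldl (fun f item => f.setdefault (PySem.Str.lower item) item) d).get? k =
        (d.get? k).or (items.find? (fun o => PySem.Str.lower o == k)) := by
  induction items with
  | nil => intro d k; cases h : d.get? k <;> simp [h]
  | cons item rest ih =>
    intro d k
    simp only [List.foldl_cons, List.find?_cons]
    rw [ih]
    by_cases he : PySem.Str.lower item = k
    · rw [he, PySem.Dict.get?_setdefault_self]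
      cases d.get? k <;> simp
    · rw [PySem.Dict.get?_setdefault_of_ne d item (fun hk => he hk.symm)]
      have : (PySem.Str.lower item == k) = false := by simp [he]
      simp [this]

theorem ports_agree (items : List String) (min_frequency : Int) :
    find_consensus_items_py items min_frequency = find_consensus_items_py_alt items min_frequency := by
  simp only [find_consensus_items_py, find_consensus_items_py_alt]
  rw [PySem.List.foldl_prod_mk
    (f := fun d item => PySem.Dict.insert d (PySem.Str.lower item) (d.getD (PySem.Str.lower item) 0 + 1))
    (g := fun f item => PySem.Dict.setdefault f (PySem.Str.lower item) item)]
  have hcounts : items.foldl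
      (fun d item => PySem.Dict.insert d (PySem.Str.lower item) (d.getD (PySem.Str.lower item) 0 + 1))
      PySem.Dict.empty =
      PySem.Dict.counter (items.map (fun item => PySem.Str.lower item)) := by
    rw [← PySem.Dict.foldl_insert_getD_add_one_eq_counter, List.foldl_map]
  rw [hcounts]
  simp only []
  set lows := List.map (fun item => PySem.Str.lower item) items with hlows
  set P := (PySem.Dict.counter lows).items with hPdef
  set FD := List.foldl (fun f item => PySem.Dict.setdefault f (PySem.Str.lower item) item)
    PySem.Dict.empty items with hFDdef
  set mc := List.foldl (fun m c => if c > m then c else m) 0 (PySem.Dict.counter lows).values with hmcdef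
  set th := if min_frequency > 1 then min_frequency else 1 with hthdef
  -- max fold is a fold of `max`
  have hmc : mc = List.foldl max 0 (PySem.Dict.counter lows).values := by
    rw [hmcdef]
    congr 1
    funext m c
    simp only [max_def]
    split <;> split <;> omega
  have hmc0 : 0 ≤ mc := by rw [hmc]; exact (PySem.List.le_foldl_max _ _).1
  have hvalues : (PySem.Dict.counter lows).values = P.map (fun p => p.2) := rfl
  have hvals : ∀ p ∈ P, 1 ≤ p.2 ∧ p.2 ≤ mc := by
    intro p hp
    constructor
    · rw [hPdef, PySem.Dict.items_counter] at hp
      obtain ⟨kk, hk, rfl⟩ := List.mem_map.mp hp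
      rw [PySem.Set.mem_ofList] at hk
      have h1 : 0 < List.count kk lows := List.count_pos_iff.mpr hk
      simp only []
      exact_mod_cast h1
    · rw [hmc]
      exact (PySem.List.le_foldl_max _ _).2 p.2 (by rw [hvalues]; exact List.mem_map_of_mem hp)
  have hth1 : 1 ≤ th := by rw [hthdef]; split <;> omega
  have hthmf : min_frequency ≤ th := by rw [hthdef]; split <;> omega
  have hthcases : th = min_frequency ∨ (th = 1 ∧ min_frequency ≤ 1) := by
    rw [hthdef]; split
    · exact Or.inl rfl
    · exact Or.inr ⟨rfl, by omega⟩
  set k := (mc - th + 1).toNat with hkdef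
  set gA := fun p : String × Int =>
    (List.find? (fun original => PySem.Str.lower original == p.1) items).getD "" with hgA
  set q := fun p : String × Int => decide (min_frequency ≤ p.2) with hq
  have hmemP : ∀ p ∈ P, p.1 ∈ lows := by
    intro p hp
    rw [hPdef, PySem.Dict.items_counter] at hp
    obtain ⟨kk, hk, rfl⟩ := List.mem_map.mp hp
    simpa [PySem.Set.mem_ofList] using hk
  -- ===== A side =====
  have hA : List.foldl
      (fun acc p =>
        if min_frequency ≤ p.2 then
          match List.find? (fun original => PySem.Str.lower original == p.1) items with
          | some original => acc ++ [original]
          | none => acc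
        else acc)
      [] (PySem.List.sorted P (fun p => p.2) true) = (gkey P mc k).map gA := by
    rw [PySem.List.foldl_congr_mem _ _
      (fun acc p => if q p = true then acc ++ [gA p] else acc) _ ?_]
    · rw [PySem.List.foldl_append_if q gA]
      rw [sorted_eq_gkey P mc.toNat mc
        (fun p hp => ⟨by have := hvals p hp; omega, (hvals p hp).2⟩)]
      rw [filter_gkey P q mc.toNat mc]
      have hfq : ∀ p ∈ P.filter q, th ≤ p.2 := by
        intro p hp
        rw [List.mem_filter] at hp
        have h1 := hvals p hp.1
        have h2 : min_frequency ≤ p.2 := by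
          have := hp.2
          rw [hq] at this
          simpa using this
        rcases hthcases with h | ⟨h, _⟩ <;> omega
      by_cases hcase : 0 ≤ mc - th + 1
      · have hsplit : mc.toNat = k + (mc.toNat - k) := by omega
        rw [hsplit, gkey_add]
        rw [gkey_empty_of_gt (P.filter q) (mc.toNat - k) (mc - k)
          (fun p hp => by have := hfq p hp; omega)]
        rw [List.append_nil]
        rw [hq, gkey_filter_ge P min_frequency k mc (fun c h1 h2 => by omega)]
        simp
      · have hk0 : k = 0 := by omega
        rw [gkey_empty_of_gt (P.filter q) mc.toNat mc
          (fun p hp => by have := hfq p hp; omega)]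
        rw [hk0]
        rfl
    · intro acc p hp
      rw [PySem.List.mem_sorted] at hp
      obtain ⟨it, hit, hitl⟩ := List.mem_map.mp (hmemP p hp)
      have hsome : (List.find? (fun original => PySem.Str.lower original == p.1) items).isSome :=
        List.find?_isSome.mpr ⟨it, hit, by simp [hitl]⟩
      obtain ⟨o, ho⟩ := Option.isSome_iff_exists.mp hsome
      rw [ho]
      by_cases hmf : min_frequency ≤ p.2 <;> simp [hmf, hq, hgA, ho]
  rw [hA]
  -- ===== B side =====
  set bk0 := (PySem.List.pyRange 0 (mc + 1) 1).map (fun _ => ([] : List String)) with hbk0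
  set buckets := List.foldl
    (fun bk p => PySem.List.pySetD bk p.2 (PySem.List.pyGetD bk p.2 [] ++ [p.1])) bk0 P with hbuckets
  have hlen0 : (bk0.length : Int) = mc + 1 := by
    rw [hbk0]
    simp [PySem.List.length_pyRange_one]
    omega
  have hbucket : ∀ c : Int, th - 1 < c → c ≤ mc →
      PySem.List.pyGetD buckets c [] = (P.filter (fun p => decide (p.2 = c))).map (fun p => p.1) := by
    intro c h1 h2
    rw [hbuckets, buckets_spec P bk0 c
      (fun p hp => ⟨by have := hvals p hp; omega, by rw [hlen0]; have := hvals p hp; omega⟩)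
      (by omega) (by rw [hlen0]; omega)]
    rw [hbk0, pyGetD_map_const_nil]
    rfl
  have hB : List.foldl
      (fun res c => List.foldl (fun res low => res ++ [FD.getD low ""]) res
        (PySem.List.pyGetD buckets c []))
      [] (PySem.List.pyRange mc (th - 1) (-1)) =
      (gkey P mc k).map (fun p => FD.getD p.1 "") := by
    rw [PySem.List.foldl_congr_mem _ _
      (fun res c => res ++ (PySem.List.pyGetD buckets c []).map (fun low => FD.getD low "")) _
      (fun res c _ => PySem.List.foldl_append_singleton_eq_map _ _ _)]
    rw [PySem.List.foldl_append_eq_flatMap (fun c => (PySem.List.pyGetD buckets c []).map (fun low => FD.getD low ""))]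
    rw [List.nil_append]
    rw [List.flatMap_congr (g := fun c => (P.filter (fun p => decide (p.2 = c))).map (fun p => FD.getD p.1 ""))
      ?_]
    · exact range_flatMap P (fun p => FD.getD p.1 "") k mc (th - 1) (by omega)
    · intro c hc
      rw [PySem.List.mem_pyRange_neg_one] at hc
      rw [hbucket c hc.1 hc.2, List.map_map]
      rfl
  rw [hB]
  -- ===== join the two sides =====
  congr 1
  apply List.map_congr_left
  intro p hp
  have hpP := (mem_gkey P k mc p hp).1
  rw [PySem.Dict.getD_eq_get?_getD, hFDdef, first_get? items PySem.Dict.empty p.1]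
  simp [PySem.Dict.get?_empty, hgA]

-- ===== VERDICT (by name: the statement is the Claim_ definition above) =====
theorem find_consensus_items_py_spec : Claim_equal_find_consensus_items_py := by
  intro items min_frequency _
  unfold Spec_find_consensus_items_py
  exact ports_agree items min_frequency
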